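-- pv_equiv track=rewrite | github.com/ds185429/DNAX-DeepNLPAnalyzerX- | DNAX/DNAX/views.py | get_iteration
-- ===== SOURCE A (Python) =====
-- def get_iteration(list, start_keyword, end_keyword):
--     result = []
--     found = False
--     for i in range(len(list) - 1, -1, -1):
--         if list[i] == '': continue
--         if end_keyword in list[i]:
--             while i >= 0:
--                 result.append(list[i])
--                 if start_keyword in list[i]: found = True; break
--                 i -= 1
--             break
--     if found: return result
--     return []
-- ===== SOURCE B (Python) =====
-- def get_iteration(list, start_keyword, end_keyword):
--     end_index = None
--     for i in range(len(list) - 1, -1, -1):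
--         if list[i] != '' and end_keyword in list[i]:
--             end_index = i
--             break
--     if end_index is None:
--         return []
--     for j in range(end_index, -1, -1):
--         if start_keyword in list[j]:
--             return list[j:end_index + 1][::-1]
--     return []
-- ===== Notes on version B (the rewrite author's own statement) =====
-- stated objective: simpler
-- what changed: B finds the end index and the start index with two plain backward index scans and returns the reversed slice list[j:end_index+1][::-1], instead of A's nested while-loop that appends the lines one by one with a 'found' flag.
import Mathlib
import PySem

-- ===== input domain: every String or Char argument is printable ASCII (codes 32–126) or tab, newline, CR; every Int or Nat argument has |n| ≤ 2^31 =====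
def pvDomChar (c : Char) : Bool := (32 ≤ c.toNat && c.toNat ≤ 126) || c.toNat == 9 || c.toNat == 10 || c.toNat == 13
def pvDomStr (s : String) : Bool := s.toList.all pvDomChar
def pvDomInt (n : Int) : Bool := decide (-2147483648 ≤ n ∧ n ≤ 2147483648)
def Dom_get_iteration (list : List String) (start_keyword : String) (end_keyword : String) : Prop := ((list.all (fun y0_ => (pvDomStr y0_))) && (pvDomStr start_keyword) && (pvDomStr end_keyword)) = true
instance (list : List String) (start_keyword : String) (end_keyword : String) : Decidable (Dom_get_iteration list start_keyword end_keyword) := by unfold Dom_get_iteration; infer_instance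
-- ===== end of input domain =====

-- B replaces A's nested while-loop with a 'found' flag by two backward index scans
-- (find end_index, then start index) and a reversed slice — simpler decomposition, same cost.


-- ===== PORT A =====
-- A's inner 'while i >= 0' loop: k = i+1; appends list[i], stops with found=True on a
-- start_keyword hit, otherwise decrements; returns (result-so-far, found).
def pvInnerA (l : List String) (sk : String) : Nat → List String → List String × Bool
  | 0, acc => (acc, false)
  | k + 1, acc =>
    let line := l.getD k ""
    let acc' := acc ++ [line]
    if PySem.Str.isIn sk line then (acc', true) else pvInnerA l sk k acc'

-- A's outer 'for i in range(len(list)-1, -1, -1)' loop: k = i+1; skips '' lines,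
-- enters the while loop on an end_keyword hit and breaks; the trailing
-- 'if found: return result / return []' is applied at the break.
def pvOuterA (l : List String) (sk ek : String) : Nat → List String
  | 0 => []
  | k + 1 =>
    let line := l.getD k ""
    if line = "" then pvOuterA l sk ek k
    else if PySem.Str.isIn ek line then
      let r := pvInnerA l sk (k + 1) []
      if r.2 then r.1 else []
    else pvOuterA l sk ek k

def get_iteration (list : List String) (start_keyword : String) (end_keyword : String) : List String :=
  pvOuterA list start_keyword end_keyword list.length

-- ===== PORT B =====
-- Source B's first loop: largest i < k with list[i] != '' and end_keyword in list[i].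
def pvFindEnd (l : List String) (ek : String) : Nat → Option Nat
  | 0 => none
  | k + 1 =>
    if l.getD k "" ≠ "" ∧ PySem.Str.isIn ek (l.getD k "") then some k else pvFindEnd l ek k

-- Source B's second loop: largest j < k with start_keyword in list[j].
def pvFindStart (l : List String) (sk : String) : Nat → Option Nat
  | 0 => none
  | j + 1 =>
    if PySem.Str.isIn sk (l.getD j "") then some j else pvFindStart l sk j

def get_iteration_alt (list : List String) (start_keyword : String) (end_keyword : String) : List String :=
  match pvFindEnd list end_keyword list.length with
  | none => []
  | some i =>
    match pvFindStart list start_keyword (i + 1) with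
    | none => []
    | some j => (PySem.List.slice list (some (j : Int)) (some ((i : Int) + 1))).reverse

-- ===== PRECONDITION & SPEC =====
def Spec_get_iteration (list : List String) (start_keyword : String) (end_keyword : String) (out : List String) : Prop := out = get_iteration_alt list start_keyword end_keyword
instance (list : List String) (start_keyword : String) (end_keyword : String) (out : List String) : Decidable (Spec_get_iteration list start_keyword end_keyword out) := by unfold Spec_get_iteration; infer_instance

-- ===== CLAIM (what is proved, stated in full; the proofs are below) =====
def Claim_equal_get_iteration : Prop := ∀ (list : List String) (start_keyword : String) (end_keyword : String), Dom_get_iteration list start_keyword end_keyword → Spec_get_iteration list start_keyword end_keyword (get_iteration list start_keyword end_keyword)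

-- ===== LEMMAS AND PROOFS =====

theorem pvFindStart_lt {l : List String} {sk : String} {k j : Nat}
    (h : pvFindStart l sk k = some j) : j < k := by
  induction k with
  | zero => simp [pvFindStart] at h
  | succ k ih =>
    rw [pvFindStart] at h
    split at h
    · simp only [Option.some.injEq] at h; omega
    · exact Nat.lt_succ_of_lt (ih h)

theorem pvInnerA_eq (l : List String) (sk : String) (k : Nat) (acc : List String)
    (hk : k ≤ l.length) :
    pvInnerA l sk k acc =
      match pvFindStart l sk k with
      | some j => (acc ++ ((l.drop j).take (k - j)).reverse, true)
      | none => (acc ++ (l.take k).reverse, false) := by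
  induction k generalizing acc with
  | zero => simp [pvInnerA, pvFindStart]
  | succ k ih =>
    have hklt : k < l.length := hk
    have hget : l.getD k "" = l[k] := List.getD_eq_getElem l "" hklt
    rw [pvInnerA, pvFindStart]
    by_cases hs : PySem.Str.isIn sk (l.getD k "") = true
    · have h1 : List.take 1 (List.drop k l) = [l[k]] := by
        rw [List.take_one, List.head?_drop]
        simp [List.getElem?_eq_getElem hklt]
      simp only [hs]
      simp [h1, List.getElem?_eq_getElem hklt]
    · rw [if_neg hs, if_neg hs, ih (acc ++ [l.getD k ""]) (by omega)]
      cases hfs : pvFindStart l sk k with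
      | none =>
        rw [List.take_add_one, List.getElem?_eq_getElem hklt, List.reverse_append, hget]
        simp
      | some j =>
        have hjk : j < k := pvFindStart_lt hfs
        have h2 : (l.drop j).take (k + 1 - j) = (l.drop j).take (k - j) ++ [l[k]] := by
          have he : k + 1 - j = (k - j) + 1 := by omega
          rw [he, List.take_add_one]
          have hd : (l.drop j)[k - j]? = some l[k] := by
            rw [List.getElem?_drop]
            have hjj : j + (k - j) = k := by omega
            rw [hjj, List.getElem?_eq_getElem hklt]
          simp [hd]
        simp [h2, List.getElem?_eq_getElem hklt]

theorem pvOuterA_eq (l : List String) (sk ek : String) (k : Nat) (hk : k ≤ l.length) :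
    pvOuterA l sk ek k =
      match pvFindEnd l ek k with
      | none => []
      | some i =>
        match pvFindStart l sk (i + 1) with
        | none => []
        | some j => ((l.drop j).take (i + 1 - j)).reverse := by
  induction k with
  | zero => simp [pvOuterA, pvFindEnd]
  | succ k ih =>
    rw [pvOuterA, pvFindEnd]
    by_cases he : l.getD k "" = ""
    · rw [if_pos he, ih (by omega), he, if_neg (by simp)]
    · by_cases hekw : PySem.Str.isIn ek (l.getD k "") = true
      · rw [if_neg he, if_pos hekw,
          if_pos (show l.getD k "" ≠ "" ∧ PySem.Str.isIn ek (l.getD k "") = true from ⟨he, hekw⟩)]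
        rw [pvInnerA_eq l sk (k + 1) [] hk]
        cases hfs : pvFindStart l sk (k + 1) <;> simp [hfs]
      · rw [if_neg he, if_neg hekw, if_neg (fun h => hekw h.2), ih (by omega)]

-- ===== VERDICT (by name: the statement is the Claim_ definition above) =====
theorem get_iteration_spec : Claim_equal_get_iteration := by
  intro l sk ek _
  unfold Spec_get_iteration get_iteration get_iteration_alt
  rw [pvOuterA_eq l sk ek l.length (le_refl _)]
  cases hfe : pvFindEnd l ek l.length with
  | none => simp
  | some i =>
    simp only [hfe]
    cases hfs : pvFindStart l sk (i + 1) with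
    | none => simp
    | some j =>
      simp only [hfs]
      have hc : ((i : Int) + 1) = ((i + 1 : Nat) : Int) := by push_cast; ring
      rw [hc, PySem.List.slice_natCast]
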